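-- pv_equiv track=rewrite | github.com/JohnnyVM/excel-2-odoo | app/schema.py | odooClassName
-- ===== SOURCE A (Python) =====
-- def odooClassName(name: str):
--     clas = ""
--     makeUpper = False
--     for idx, letter in enumerate(name):
--         if letter == '.':
--             makeUpper = True
--             continue
--
--         if not idx or makeUpper:
--             letter = str.upper(letter)
--             makeUpper = False
--
--         clas += letter
--
--     return clas
-- ===== SOURCE B (Python) =====
-- def odooClassName(name: str):
--     return "".join(p[:1].upper() + p[1:] for p in name.split('.'))
-- ===== Notes on version B (the rewrite author's own statement) =====
-- stated objective: simpler
-- what changed: Replaces the indexed per-character loop with a makeUpper state flag by a delimiter decomposition: split the name on the dot separator, uppercase only the first character of each segment via slicing, and join the segments.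
import Mathlib
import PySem

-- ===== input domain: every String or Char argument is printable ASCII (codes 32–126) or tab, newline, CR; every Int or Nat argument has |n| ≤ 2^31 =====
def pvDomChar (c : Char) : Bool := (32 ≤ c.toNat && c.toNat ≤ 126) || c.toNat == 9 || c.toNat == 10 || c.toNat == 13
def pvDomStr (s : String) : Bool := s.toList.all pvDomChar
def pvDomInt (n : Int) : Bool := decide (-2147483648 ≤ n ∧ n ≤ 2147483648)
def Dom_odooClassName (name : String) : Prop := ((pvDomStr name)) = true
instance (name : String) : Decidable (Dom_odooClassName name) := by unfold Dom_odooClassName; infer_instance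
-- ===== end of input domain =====

-- B replaces A's indexed loop with a makeUpper flag by split-on-'.' / capitalise-first-char / join (simpler decomposition, same cost).

-- ===== PORT A =====
-- character loop over enumerate(name), state (clas, makeUpper); str.upper on one char = PySem.Chars.upperChar (exact on ASCII domain)
def stepA (st : List Char × Bool) (p : Int × Char) : List Char × Bool :=
  let clas := st.1
  let makeUpper := st.2
  let idx := p.1
  let letter := p.2
  if letter = '.' then (clas, true)
  else if idx == 0 || makeUpper then (clas ++ [PySem.Chars.upperChar letter], false)
  else (clas ++ [letter], makeUpper)

def odooClassName (name : String) : String :=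
  let st := (PySem.List.enumerate name.toList).foldl stepA ([], false)
  String.mk st.1

-- ===== PORT B =====
-- p[:1].upper() + p[1:]
def capPart (p : List Char) : List Char := PySem.Chars.upper (p.take 1) ++ p.drop 1

-- name.split('.') ported as List.splitOn; ''.join as flatten
def odooClassName_alt (name : String) : String :=
  String.mk (((name.toList.splitOn '.').map capPart).flatten)

-- ===== PRECONDITION & SPEC =====
def Spec_odooClassName (name : String) (out : String) : Prop := out = odooClassName_alt name
instance (name : String) (out : String) : Decidable (Spec_odooClassName name out) := by unfold Spec_odooClassName; infer_instance

-- ===== CLAIM (what is proved, stated in full; the proofs are below) =====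
def Claim_equal_odooClassName : Prop := ∀ (name : String), Dom_odooClassName name → Spec_odooClassName name (odooClassName name)

-- ===== LEMMAS AND PROOFS =====

-- simple state machine equivalent to A's loop body (index dropped: idx = 0 folded into the flag)
def goCls : List Char → Bool → List Char
  | [], _ => []
  | c :: cs, up =>
    if c = '.' then goCls cs true
    else (if up then PySem.Chars.upperChar c else c) :: goCls cs false

-- A's fold over enumerate cs s with s ≥ 1 appends goCls cs up to the accumulator
lemma foldA_eq_goCls (cs : List Char) (s : Int) (hs : 1 ≤ s) (acc : List Char) (up : Bool) :
    ((PySem.List.enumerate cs s).foldl stepA (acc, up)).1 = acc ++ goCls cs up := by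
  induction cs generalizing s acc up with
  | nil => simp [PySem.List.enumerate_nil, goCls]
  | cons c cs ih =>
    rw [PySem.List.enumerate_cons]
    simp only [List.foldl_cons, goCls]
    by_cases hc : c = '.'
    · simp only [stepA, hc, if_pos trivial]
      rw [ih _ (by omega)]
    · have hidx : (s == 0) = false := by simp; omega
      simp only [stepA, if_neg hc, hidx, Bool.false_or]
      cases up with
      | true =>
        simp only [if_true]
        rw [ih _ (by omega)]
        simp
      | false =>
        simp only [Bool.false_eq_true, if_false]
        rw [ih _ (by omega)]
        simp

-- goCls with the flag set is exactly split/capitalise/join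
lemma goCls_eq_split (cs : List Char) (up : Bool) :
    goCls cs up =
      (if up then capPart ((cs.splitOn '.').headI) else (cs.splitOn '.').headI)
        ++ (((cs.splitOn '.').tail).map capPart).flatten := by
  induction cs generalizing up with
  | nil =>
    simp [goCls, List.splitOn, List.splitOnP_nil, capPart, PySem.Chars.upper]
  | cons c cs ih =>
    have hne : cs.splitOnP (· == '.') ≠ [] := List.splitOnP_ne_nil _ _
    obtain ⟨h, t, hht⟩ := List.exists_cons_of_ne_nil hne
    by_cases hc : c = '.'
    · have hsplit : (c :: cs).splitOn '.' = [] :: cs.splitOn '.' := by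
        simp [List.splitOn, List.splitOnP_cons, hc]
      rw [hsplit]
      simp only [goCls, if_pos hc, ih true, List.splitOn] at *
      simp [capPart, PySem.Chars.upper, hht]
    · have hsplit : (c :: cs).splitOn '.' = (c :: h) :: t := by
        simp [List.splitOn, List.splitOnP_cons, hc, hht]
      rw [hsplit]
      have := ih false
      simp only [List.splitOn, hht] at this
      simp only [goCls, if_neg hc, this]
      cases up <;> simp [capPart, PySem.Chars.upper]

lemma odooClassName_eq (name : String) : odooClassName name = odooClassName_alt name := by
  unfold odooClassName odooClassName_alt
  simp only []
  cases hcs : name.toList with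
  | nil => simp [PySem.List.enumerate_nil, List.splitOn, List.splitOnP_nil, capPart, PySem.Chars.upper]
  | cons c cs =>
    rw [PySem.List.enumerate_cons]
    simp only [List.foldl_cons]
    have hne : cs.splitOnP (· == '.') ≠ [] := List.splitOnP_ne_nil _ _
    obtain ⟨h, t, hht⟩ := List.exists_cons_of_ne_nil hne
    by_cases hc : c = '.'
    · have hsplit : (c :: cs).splitOn '.' = [] :: cs.splitOn '.' := by
        simp [List.splitOn, List.splitOnP_cons, hc]
      simp only [stepA, if_pos hc, hsplit, zero_add]
      rw [foldA_eq_goCls cs 1 le_rfl [] true, goCls_eq_split]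
      simp [List.splitOn, hht, capPart, PySem.Chars.upper]
    · have hsplit : (c :: cs).splitOn '.' = (c :: h) :: t := by
        simp [List.splitOn, List.splitOnP_cons, hc, hht]
      have h0 : ((0 : Int) == 0) = true := rfl
      simp only [stepA, if_neg hc, h0, Bool.true_or, if_true, hsplit, zero_add]
      rw [foldA_eq_goCls cs 1 le_rfl _ false, goCls_eq_split]
      simp [List.splitOn, hht, capPart, PySem.Chars.upper]

-- ===== VERDICT (by name: the statement is the Claim_ definition above) =====
theorem odooClassName_spec : Claim_equal_odooClassName := by
  intro name _
  unfold Spec_odooClassName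
  exact odooClassName_eq name
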